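-- pv_equiv track=rewrite | github.com/pbhandar2/mascots | mascots/traceAnalysis/rdHist.py | filter_rdhist
-- ===== SOURCE A (Python) =====
-- def filter_rdhist(rdhist):
--     zero_entry_count = 0
--     rdhist_length = len(rdhist)
--
--     # start reading from the end of the histogram
--     for i in range(rdhist_length-1, 1, -1):
--
--         # if both read and write count of the current bin is zero then update counter else break
--         if rdhist[i][0] == 0 and rdhist[i][1] == 0:
--             zero_entry_count += 1
--         else:
--             break
--
--     return rdhist[0:rdhist_length-zero_entry_count]
-- ===== SOURCE B (Python) =====
-- def filter_rdhist(rdhist):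
--     # forward scan: index of the last bin with a nonzero read or write count
--     # (indices 0 and 1 are always kept, matching the original's range bound)
--     last = 1
--     for i in range(2, len(rdhist)):
--         if rdhist[i][0] != 0 or rdhist[i][1] != 0:
--             last = i
--     return rdhist[0:last+1]
-- ===== Notes on version B (the rewrite author's own statement) =====
-- stated objective: alternative
-- what changed: Replaces the backward scan that counts trailing zero bins with an early break by a forward scan that tracks the index of the last nonzero bin and slices once.
import Mathlib
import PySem

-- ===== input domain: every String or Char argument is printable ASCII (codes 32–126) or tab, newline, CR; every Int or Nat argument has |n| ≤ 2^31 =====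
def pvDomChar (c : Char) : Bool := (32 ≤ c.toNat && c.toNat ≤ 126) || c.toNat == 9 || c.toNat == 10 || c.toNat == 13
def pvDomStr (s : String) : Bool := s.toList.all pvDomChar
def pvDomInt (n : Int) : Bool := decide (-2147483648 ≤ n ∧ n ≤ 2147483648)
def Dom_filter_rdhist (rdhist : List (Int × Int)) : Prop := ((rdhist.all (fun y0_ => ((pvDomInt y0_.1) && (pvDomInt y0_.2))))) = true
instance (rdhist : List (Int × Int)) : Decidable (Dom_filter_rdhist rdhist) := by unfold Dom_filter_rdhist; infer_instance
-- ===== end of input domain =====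

-- B trades A's backward trailing-zero count (with early break) for a forward scan
-- tracking the last nonzero bin index; same cost, different decomposition.

-- ===== PORT A =====
-- A's loop 'for i in range(len-1, 1, -1): if zero: count += 1 else: break',
-- as a countdown recursion on the index (the 'else: break' is the 0 result).
-- pyGet? cannot return none here (the loop index is always in range); none ↦ 0 is unreachable.
def pvACount (rdhist : List (Int × Int)) : Nat → Int
  | i + 2 =>
    match PySem.List.pyGet? rdhist ((i : Int) + 2) with
    | some p => if p.1 = 0 ∧ p.2 = 0 then 1 + pvACount rdhist (i + 1) else 0
    | none => 0
  | _ => 0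

def filter_rdhist (rdhist : List (Int × Int)) : List (Int × Int) :=
  PySem.List.slice rdhist (some 0)
    (some ((rdhist.length : Int) - pvACount rdhist (rdhist.length - 1)))

-- ===== PORT B =====
-- 'last = i if rdhist[i] is nonzero else last' — the body of B's forward loop
def pvKeep (rdhist : List (Int × Int)) (last i : Int) : Int :=
  if (PySem.List.pyGetD rdhist i (0, 0)).1 ≠ 0 ∨ (PySem.List.pyGetD rdhist i (0, 0)).2 ≠ 0
  then i else last

def filter_rdhist_alt (rdhist : List (Int × Int)) : List (Int × Int) :=
  PySem.List.slice rdhist (some 0)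
    (some ((PySem.List.pyRange 2 (rdhist.length : Int) 1).foldl (pvKeep rdhist) 1 + 1))

-- ===== PRECONDITION & SPEC =====
def Spec_filter_rdhist (rdhist : List (Int × Int)) (out : List (Int × Int)) : Prop := out = filter_rdhist_alt rdhist
instance (rdhist : List (Int × Int)) (out : List (Int × Int)) : Decidable (Spec_filter_rdhist rdhist out) := by unfold Spec_filter_rdhist; infer_instance

-- ===== CLAIM (what is proved, stated in full; the proofs are below) =====
def Claim_equal_filter_rdhist : Prop := ∀ (rdhist : List (Int × Int)), Dom_filter_rdhist rdhist → Spec_filter_rdhist rdhist (filter_rdhist rdhist)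

-- ===== LEMMAS AND PROOFS =====

-- A's count and B's last-nonzero index describe the same cut point:
-- m - pvACount (m-1) = (last nonzero index below m, at least 1) + 1.
lemma pv_key (rdhist : List (Int × Int)) :
    ∀ m : Nat, 2 ≤ m → m ≤ rdhist.length →
      (m : Int) - pvACount rdhist (m - 1) =
        (PySem.List.pyRange 2 (m : Int) 1).foldl (pvKeep rdhist) 1 + 1 := by
  intro m h2
  induction m, h2 using Nat.le_induction with
  | base =>
    intro _
    have h0 : pvACount rdhist (2 - 1) = 0 := rfl
    rw [h0, PySem.List.pyRange_one_eq_nil (by norm_num)]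
    norm_num [List.foldl]
  | succ m hm ih =>
    intro hlen
    obtain ⟨i, rfl⟩ : ∃ i, m = i + 2 := ⟨m - 2, by omega⟩
    have hidx : i + 2 < rdhist.length := by omega
    have hget : PySem.List.pyGet? rdhist ((i : Int) + 2) = some rdhist[i + 2] := by
      have h := PySem.List.pyGet?_ofNat rdhist (i + 2) hidx
      have hc : ((i + 2 : Nat) : Int) = (i : Int) + 2 := by push_cast; ring
      rwa [hc] at h
    have hgetD : PySem.List.pyGetD rdhist (((i + 2 : Nat) : Int)) (0, 0) = rdhist[i + 2] :=
      PySem.List.pyGetD_ofNat rdhist (i + 2) (0, 0) hidx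
    have hsplit : PySem.List.pyRange 2 ((i + 2 + 1 : Nat) : Int) 1 =
        PySem.List.pyRange 2 ((i + 2 : Nat) : Int) 1 ++ [((i + 2 : Nat) : Int)] := by
      have : ((i + 2 + 1 : Nat) : Int) = ((i + 2 : Nat) : Int) + 1 := by push_cast; ring
      rw [this, PySem.List.pyRange_one_succ_right (by push_cast; omega)]
    have hAm : pvACount rdhist (i + 2 + 1 - 1) = pvACount rdhist (i + 2) := by norm_num
    rw [hAm, hsplit, List.foldl_append]
    simp only [List.foldl]
    by_cases hz : rdhist[i + 2].1 = 0 ∧ rdhist[i + 2].2 = 0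
    · have hA : pvACount rdhist (i + 2) = 1 + pvACount rdhist (i + 1) := by
        simp only [pvACount, hget]
        rw [if_pos hz]
      have hK : pvKeep rdhist ((PySem.List.pyRange 2 ((i + 2 : Nat) : Int) 1).foldl (pvKeep rdhist) 1)
          ((i + 2 : Nat) : Int) =
          (PySem.List.pyRange 2 ((i + 2 : Nat) : Int) 1).foldl (pvKeep rdhist) 1 := by
        simp only [pvKeep, hgetD]
        rw [if_neg (by tauto)]
      rw [hA, hK]
      have := ih (by omega)
      have h2' : (i + 2 : Nat) - 1 = i + 1 := by omega
      rw [h2'] at this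
      push_cast at this ⊢
      omega
    · have hA : pvACount rdhist (i + 2) = 0 := by
        simp only [pvACount, hget]
        rw [if_neg hz]
      have hK : pvKeep rdhist ((PySem.List.pyRange 2 ((i + 2 : Nat) : Int) 1).foldl (pvKeep rdhist) 1)
          ((i + 2 : Nat) : Int) = ((i + 2 : Nat) : Int) := by
        simp only [pvKeep, hgetD]
        rw [if_pos (by tauto)]
      rw [hA, hK]
      push_cast
      ring

theorem filter_rdhist_spec : Claim_equal_filter_rdhist := by
  unfold Claim_equal_filter_rdhist Spec_filter_rdhist
  intro rdhist _
  match rdhist with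
  | [] => rfl
  | [p] => rfl
  | a :: b :: t =>
    unfold filter_rdhist filter_rdhist_alt
    rw [pv_key (a :: b :: t) (a :: b :: t).length (by simp) (le_refl _)]
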